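-- pv_equiv track=rewrite | github.com/ukdeepak33-AI/Powerball_AI_Intelligence | api/index.py | split_numbers_into_halves
-- ===== SOURCE A (Python) =====
-- from typing import Dict, List, Any, Set, Tuple, Optional
--
-- def split_numbers_into_halves(numbers: List[int]) -> Dict[str, List[int]]:
--     """Separates numbers into two halves based on their decade group"""
--     final_halves = {'first_half': [], 'second_half': []}
--
--     sorted_numbers = sorted(numbers)
--
--     for num in sorted_numbers:
--         decade_start = (num - 1) // 10 * 10 + 1
--
--         if num in range(decade_start, decade_start + 5):
--             final_halves['first_half'].append(num)
--         else:
--             final_halves['second_half'].append(num)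
--
--     return final_halves
-- ===== SOURCE B (Python) =====
-- def split_numbers_into_halves(numbers):
--     """Separates numbers into two halves based on their decade group"""
--     return {
--         'first_half': sorted(n for n in numbers if (n - 1) % 10 < 5),
--         'second_half': sorted(n for n in numbers if (n - 1) % 10 >= 5),
--     }
-- ===== Notes on version B (the rewrite author's own statement) =====
-- stated objective: simpler
-- what changed: Replaces the sort-once-then-branch loop with two independent filtered comprehensions, each sorted separately, using the arithmetic predicate (n-1)%10 < 5 instead of the decade-start computation and range membership.
import Mathlib
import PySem

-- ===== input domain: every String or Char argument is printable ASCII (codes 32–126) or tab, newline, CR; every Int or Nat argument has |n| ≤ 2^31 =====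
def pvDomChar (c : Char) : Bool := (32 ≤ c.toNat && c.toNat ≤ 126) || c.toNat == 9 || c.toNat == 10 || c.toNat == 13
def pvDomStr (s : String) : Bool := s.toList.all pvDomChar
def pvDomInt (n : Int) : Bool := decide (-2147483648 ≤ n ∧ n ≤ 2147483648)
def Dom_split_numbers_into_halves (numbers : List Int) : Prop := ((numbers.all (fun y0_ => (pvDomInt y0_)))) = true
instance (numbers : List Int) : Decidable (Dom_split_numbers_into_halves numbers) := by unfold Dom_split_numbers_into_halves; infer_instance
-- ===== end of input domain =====

-- B replaces A's sort-once-then-branch loop by two independent filter+sort passes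
-- using the arithmetic predicate (n-1)%10 < 5; objective: simpler.

-- ===== PORT A =====
def split_numbers_into_halves (numbers : List Int) : List (String × List Int) :=
  let sorted_numbers := PySem.List.sorted numbers (fun x => x) false
  let halves := sorted_numbers.foldl
    (fun (acc : List Int × List Int) num =>
      let decade_start := PySem.Int.floordiv (num - 1) 10 * 10 + 1
      if num ∈ PySem.List.pyRange decade_start (decade_start + 5) 1 then
        (acc.1 ++ [num], acc.2)
      else
        (acc.1, acc.2 ++ [num]))
    ([], [])
  [("first_half", halves.1), ("second_half", halves.2)]

-- ===== PORT B =====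
def split_numbers_into_halves_alt (numbers : List Int) : List (String × List Int) :=
  [("first_half",
      PySem.List.sorted (numbers.filter (fun n => PySem.Int.mod (n - 1) 10 < 5)) (fun x => x) false),
   ("second_half",
      PySem.List.sorted (numbers.filter (fun n => 5 ≤ PySem.Int.mod (n - 1) 10)) (fun x => x) false)]

-- ===== PRECONDITION & SPEC =====
def Spec_split_numbers_into_halves (numbers : List Int) (out : List (String × List Int)) : Prop := out = split_numbers_into_halves_alt numbers
instance (numbers : List Int) (out : List (String × List Int)) : Decidable (Spec_split_numbers_into_halves numbers out) := by unfold Spec_split_numbers_into_halves; infer_instance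

-- ===== CLAIM (what is proved, stated in full; the proofs are below) =====
def Claim_equal_split_numbers_into_halves : Prop := ∀ (numbers : List Int), Dom_split_numbers_into_halves numbers → Spec_split_numbers_into_halves numbers (split_numbers_into_halves numbers)

-- ===== LEMMAS AND PROOFS =====

-- A's range-membership test is exactly the predicate (num-1) % 10 < 5.
theorem mem_decade_range_iff (num : Int) :
    (num ∈ PySem.List.pyRange (PySem.Int.floordiv (num - 1) 10 * 10 + 1)
        (PySem.Int.floordiv (num - 1) 10 * 10 + 1 + 5) 1) ↔
      PySem.Int.mod (num - 1) 10 < 5 := by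
  rw [PySem.List.mem_pyRange_one]
  have hdm := PySem.Int.floordiv_mul_add_mod (num - 1) 10
  have h0 := PySem.Int.mod_nonneg (num - 1) (b := 10) (by omega)
  have h1 := PySem.Int.mod_lt (num - 1) (b := 10) (by omega)
  omega

-- A's loop partitions the list it folds over into (filter p, filter ¬p).
theorem foldl_partition (p : Int → Prop) [DecidablePred p] (l : List Int) (a b : List Int) :
    l.foldl (fun (acc : List Int × List Int) num =>
        if p num then (acc.1 ++ [num], acc.2) else (acc.1, acc.2 ++ [num])) (a, b)
      = (a ++ l.filter (fun n => decide (p n)), b ++ l.filter (fun n => !decide (p n))) := by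
  induction l generalizing a b with
  | nil => simp
  | cons x xs ih =>
      by_cases h : p x <;> simp [h, ih, List.append_assoc]

-- sorting commutes with filtering (for the identity key).
theorem sorted_filter_comm (q : Int → Bool) (numbers : List Int) :
    PySem.List.sorted (numbers.filter q) (fun x => x) false
      = (PySem.List.sorted numbers (fun x => x) false).filter q := by
  apply PySem.List.sorted_id_eq_of_perm_of_pairwise
  · exact (PySem.List.sorted_perm numbers (fun x => x) false).filter q
  · exact (PySem.List.sorted_pairwise numbers (fun x => x)).filter q

-- ===== VERDICT (by name: the statement is the Claim_ definition above) =====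
theorem split_numbers_into_halves_spec : Claim_equal_split_numbers_into_halves := by
  intro numbers _
  unfold Spec_split_numbers_into_halves split_numbers_into_halves split_numbers_into_halves_alt
  have hcong :
      (PySem.List.sorted numbers (fun x => x) false).foldl
        (fun (acc : List Int × List Int) num =>
          let decade_start := PySem.Int.floordiv (num - 1) 10 * 10 + 1
          if num ∈ PySem.List.pyRange decade_start (decade_start + 5) 1 then
            (acc.1 ++ [num], acc.2)
          else
            (acc.1, acc.2 ++ [num])) ([], [])
      = (PySem.List.sorted numbers (fun x => x) false).foldl
        (fun (acc : List Int × List Int) num =>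
          if PySem.Int.mod (num - 1) 10 < 5 then (acc.1 ++ [num], acc.2)
          else (acc.1, acc.2 ++ [num])) ([], []) := by
    apply PySem.List.foldl_congr_mem
    intro acc x _
    simp only []
    by_cases h : PySem.Int.mod (x - 1) 10 < 5
    · rw [if_pos ((mem_decade_range_iff x).mpr h), if_pos h]
    · rw [if_neg (fun hm => h ((mem_decade_range_iff x).mp hm)), if_neg h]
  simp only [hcong, foldl_partition (fun num => PySem.Int.mod (num - 1) 10 < 5)
    (PySem.List.sorted numbers (fun x => x) false) [] []]
  rw [sorted_filter_comm, sorted_filter_comm]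
  have hf : (fun n => !decide (PySem.Int.mod (n - 1) 10 < 5))
      = (fun n => decide (5 ≤ PySem.Int.mod (n - 1) 10)) := by
    funext n
    have hmod : PySem.Int.mod (n - 1) 10 = (n - 1) % 10 :=
      PySem.Int.mod_eq_emod_of_pos (by omega)
    rw [hmod]
    by_cases h : (n - 1) % 10 < 5
    · simp [h, show ¬(5 ≤ (n - 1) % 10) from by omega]
    · simp [h, show 5 ≤ (n - 1) % 10 from by omega]
  rw [hf, List.nil_append, List.nil_append]
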